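-- pv_equiv track=rewrite | github.com/toddaerickson/manager-tool | coaching.py | _generate_template_questions
-- ===== SOURCE A (Python) =====
-- def _generate_template_questions(notes, context_type, member_name=None):
--     """Generate relevant questions without AI, based on keyword detection."""
--     questions = []
--     text = notes.lower()
--     name = member_name or "this person"
--
--     # Situation-specific questions
--     if any(w in text for w in ["frustrated", "angry", "annoyed", "upset"]):
--         questions.append(f"What is {name}'s perspective on this situation?")
--         questions.append("Is this a pattern, or a one-time event? What evidence do you have?")
--         questions.append("What would Grove say — is this a capability issue or a motivation issue?")
--
--     if any(w in text for w in ["performance", "underperform", "struggling", "behind"]):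
--         questions.append(f"Have you set unambiguous expectations with {name}? "
--                         "Would they describe the same gap you see?")
--         questions.append("Dellanna asks: are you delegating results or methods?")
--         questions.append("What's the task-relevant maturity here — do they need structure, "
--                         "communication, or just monitoring?")
--
--     if any(w in text for w in ["promote", "promotion", "career", "growth", "develop"]):
--         questions.append(f"Is {name} scaling to the call, or comfortable at the current level?")
--         questions.append("Buckingham says: are you trying to put in what was left out, "
--                         "or draw out what was left in?")
--         questions.append("What would the next 6 months look like if they were truly stretched?")
--
--     if any(w in text for w in ["feedback", "conversation", "tell them", "address"]):
--         questions.append("Have you practiced what you'll actually say? "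
--                         "Can you frame it using SBI — Situation, Behavior, Impact?")
--         questions.append("Grove: 'Don't confuse emotional comfort with operational need.' "
--                         "What outcome do you need from this conversation?")
--         questions.append(f"What does {name} think they're doing well right now?")
--
--     if any(w in text for w in ["meeting", "1-on-1", "one-on-one", "check-in"]):
--         questions.append(f"What does {name} need from you right now — "
--                         "a manager or a leader?")
--         questions.append("Are you doing 80% of the talking, or are they?")
--         questions.append("What's the one thing you're avoiding bringing up?")
--
--     if any(w in text for w in ["politics", "boss", "executive", "leadership", "influence"]):
--         questions.append("Who are your allies on this? Have you socialized the idea "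
--                         "before the meeting?")
--         questions.append("Kaplan warns: 'Otherwise confident executives overestimate "
--                         "the risk of speaking up and underestimate the risk of staying silent.'")
--         questions.append("What's the second-order effect if you do nothing?")
--
--     if any(w in text for w in ["delegate", "trust", "let go", "handoff", "empower"]):
--         questions.append("Are you delegating the result or the method? "
--                         "If the method, you haven't actually delegated.")
--         questions.append(f"What's the worst that happens if {name} does it differently than you would?")
--         questions.append("Johnson says: your primary goal is to work yourself out of a job. "
--                         "What are you still holding onto?")
--
--     if any(w in text for w in ["hire", "interview", "candidate", "recruit"]):
--         questions.append("Buckingham: what specific talents does this role require? "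
--                         "Not the job title — the actual talents.")
--         questions.append("Grove: 'Careful interviewing doesn't guarantee anything, "
--                         "it merely increases your odds of getting lucky.'")
--         questions.append("Are you hiring for the role as it is today, or as it will be in 6 months?")
--
--     if any(w in text for w in ["conflict", "disagree", "tension", "difficult"]):
--         questions.append("Have you named the conflict explicitly? 'Try to make the implicit, explicit.'")
--         questions.append("Is this a difference of agendas, perceptions, or personal styles?")
--         questions.append("What would it look like to approach this person as an ally, not an adversary?")
--
--     if any(w in text for w in ["change", "reorg", "transition", "new"]):
--         questions.append("Frei: 'Comfortable inaction is riskier than uncomfortable action.' "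
--                         "What's the cost of not now?")
--         questions.append("Have your people shifted from 'difficult, costly, weird' to "
--                         "'easy, rewarding, normal' yet?")
--         questions.append("What isn't changing? Clarifying that can be very reassuring.")
--
--     # Default questions if nothing matched
--     if not questions:
--         questions.append("What are you really trying to accomplish here?")
--         questions.append("What would you advise a friend in this exact situation?")
--         questions.append("What's the thing you're not saying out loud?")
--
--     return questions[:4]  # Max 4 questions
-- ===== SOURCE B (Python) =====
-- # Inverted keyword index: one flat (keyword, category) list, dedup matched categories,
-- # then assemble exactly the <=4 returned questions in closed form (3 from the first
-- # matched category + the first question of the second), instead of building every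
-- # matched block and truncating.
-- _GROUPS = [
--     ["frustrated", "angry", "annoyed", "upset"],
--     ["performance", "underperform", "struggling", "behind"],
--     ["promote", "promotion", "career", "growth", "develop"],
--     ["feedback", "conversation", "tell them", "address"],
--     ["meeting", "1-on-1", "one-on-one", "check-in"],
--     ["politics", "boss", "executive", "leadership", "influence"],
--     ["delegate", "trust", "let go", "handoff", "empower"],
--     ["hire", "interview", "candidate", "recruit"],
--     ["conflict", "disagree", "tension", "difficult"],
--     ["change", "reorg", "transition", "new"],
-- ]
-- _KW = [(w, c) for c, kws in enumerate(_GROUPS) for w in kws]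
--
-- _QS = [
--     lambda name: [
--         f"What is {name}'s perspective on this situation?",
--         "Is this a pattern, or a one-time event? What evidence do you have?",
--         "What would Grove say — is this a capability issue or a motivation issue?",
--     ],
--     lambda name: [
--         f"Have you set unambiguous expectations with {name}? "
--         "Would they describe the same gap you see?",
--         "Dellanna asks: are you delegating results or methods?",
--         "What's the task-relevant maturity here — do they need structure, "
--         "communication, or just monitoring?",
--     ],
--     lambda name: [
--         f"Is {name} scaling to the call, or comfortable at the current level?",
--         "Buckingham says: are you trying to put in what was left out, "
--         "or draw out what was left in?",
--         "What would the next 6 months look like if they were truly stretched?",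
--     ],
--     lambda name: [
--         "Have you practiced what you'll actually say? "
--         "Can you frame it using SBI — Situation, Behavior, Impact?",
--         "Grove: 'Don't confuse emotional comfort with operational need.' "
--         "What outcome do you need from this conversation?",
--         f"What does {name} think they're doing well right now?",
--     ],
--     lambda name: [
--         f"What does {name} need from you right now — "
--         "a manager or a leader?",
--         "Are you doing 80% of the talking, or are they?",
--         "What's the one thing you're avoiding bringing up?",
--     ],
--     lambda name: [
--         "Who are your allies on this? Have you socialized the idea "
--         "before the meeting?",
--         "Kaplan warns: 'Otherwise confident executives overestimate "
--         "the risk of speaking up and underestimate the risk of staying silent.'",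
--         "What's the second-order effect if you do nothing?",
--     ],
--     lambda name: [
--         "Are you delegating the result or the method? "
--         "If the method, you haven't actually delegated.",
--         f"What's the worst that happens if {name} does it differently than you would?",
--         "Johnson says: your primary goal is to work yourself out of a job. "
--         "What are you still holding onto?",
--     ],
--     lambda name: [
--         "Buckingham: what specific talents does this role require? "
--         "Not the job title — the actual talents.",
--         "Grove: 'Careful interviewing doesn't guarantee anything, "
--         "it merely increases your odds of getting lucky.'",
--         "Are you hiring for the role as it is today, or as it will be in 6 months?",
--     ],
--     lambda name: [
--         "Have you named the conflict explicitly? 'Try to make the implicit, explicit.'",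
--         "Is this a difference of agendas, perceptions, or personal styles?",
--         "What would it look like to approach this person as an ally, not an adversary?",
--     ],
--     lambda name: [
--         "Frei: 'Comfortable inaction is riskier than uncomfortable action.' "
--         "What's the cost of not now?",
--         "Have your people shifted from 'difficult, costly, weird' to "
--         "'easy, rewarding, normal' yet?",
--         "What isn't changing? Clarifying that can be very reassuring.",
--     ],
-- ]
--
-- _DEFAULTS = [
--     "What are you really trying to accomplish here?",
--     "What would you advise a friend in this exact situation?",
--     "What's the thing you're not saying out loud?",
-- ]
--
--
-- def _generate_template_questions(notes, context_type, member_name=None):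
--     text = notes.lower()
--     name = member_name or "this person"
--     # matched category indices, ascending (first-occurrence dedup over the
--     # category-ordered flat keyword list)
--     hit = list(dict.fromkeys(c for w, c in _KW if w in text))
--     if not hit:
--         return list(_DEFAULTS)
--     out = _QS[hit[0]](name)
--     if len(hit) > 1:
--         out.append(_QS[hit[1]](name)[0])
--     return out
-- ===== Notes on version B (the rewrite author's own statement) =====
-- stated objective: alternative
-- what changed: Replaces ten sequential if-blocks that build every matched question block and truncate to 4 with an inverted flat (keyword, category) index: dedup the matched category indices once, then assemble the at-most-4 returned questions in closed form (first matched category's 3 questions plus the second's first question, or the defaults).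
import Mathlib
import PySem

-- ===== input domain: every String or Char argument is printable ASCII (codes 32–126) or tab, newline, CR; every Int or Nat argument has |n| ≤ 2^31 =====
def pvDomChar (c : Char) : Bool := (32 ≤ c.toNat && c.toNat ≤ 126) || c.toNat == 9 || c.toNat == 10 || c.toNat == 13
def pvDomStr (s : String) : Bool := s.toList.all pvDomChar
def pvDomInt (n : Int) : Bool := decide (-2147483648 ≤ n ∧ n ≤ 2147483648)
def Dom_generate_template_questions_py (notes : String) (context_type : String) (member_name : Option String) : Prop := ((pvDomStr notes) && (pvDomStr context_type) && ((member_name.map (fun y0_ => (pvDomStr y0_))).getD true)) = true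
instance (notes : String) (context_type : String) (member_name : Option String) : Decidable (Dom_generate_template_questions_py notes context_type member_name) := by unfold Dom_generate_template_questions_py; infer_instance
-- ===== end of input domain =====

-- B replaces A's ten build-everything-then-truncate if-blocks by an inverted flat
-- (keyword, category) index, dedup of matched category indices, and closed-form
-- assembly of the at-most-4 returned questions (objective: alternative algorithm).

-- ===== PORT A =====
-- name = member_name or "this person"  (shared tiny helper; both sources compute it identically)
def pvNameOf (member_name : Option String) : String :=
  match member_name with
  | some s => if s = "" then "this person" else s
  | none => "this person"

-- Port of A: ten sequential keyword-branch ifs appending questions, defaults if none, truncate to 4.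
def generate_template_questions_py (notes : String) (context_type : String) (member_name : Option String) : List String :=
  let questions : List String := []
  let text := PySem.Str.lower notes
  let name := pvNameOf member_name
  let questions := if (["frustrated", "angry", "annoyed", "upset"] : List String).any (fun w => PySem.Str.isIn w text) then
      questions ++ ["What is " ++ name ++ "'s perspective on this situation?",
        "Is this a pattern, or a one-time event? What evidence do you have?",
        "What would Grove say — is this a capability issue or a motivation issue?"]
    else questions
  let questions := if (["performance", "underperform", "struggling", "behind"] : List String).any (fun w => PySem.Str.isIn w text) then
      questions ++ ["Have you set unambiguous expectations with " ++ name ++ "? Would they describe the same gap you see?",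
        "Dellanna asks: are you delegating results or methods?",
        "What's the task-relevant maturity here — do they need structure, communication, or just monitoring?"]
    else questions
  let questions := if (["promote", "promotion", "career", "growth", "develop"] : List String).any (fun w => PySem.Str.isIn w text) then
      questions ++ ["Is " ++ name ++ " scaling to the call, or comfortable at the current level?",
        "Buckingham says: are you trying to put in what was left out, or draw out what was left in?",
        "What would the next 6 months look like if they were truly stretched?"]
    else questions
  let questions := if (["feedback", "conversation", "tell them", "address"] : List String).any (fun w => PySem.Str.isIn w text) then
      questions ++ ["Have you practiced what you'll actually say? Can you frame it using SBI — Situation, Behavior, Impact?",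
        "Grove: 'Don't confuse emotional comfort with operational need.' What outcome do you need from this conversation?",
        "What does " ++ name ++ " think they're doing well right now?"]
    else questions
  let questions := if (["meeting", "1-on-1", "one-on-one", "check-in"] : List String).any (fun w => PySem.Str.isIn w text) then
      questions ++ ["What does " ++ name ++ " need from you right now — a manager or a leader?",
        "Are you doing 80% of the talking, or are they?",
        "What's the one thing you're avoiding bringing up?"]
    else questions
  let questions := if (["politics", "boss", "executive", "leadership", "influence"] : List String).any (fun w => PySem.Str.isIn w text) then
      questions ++ ["Who are your allies on this? Have you socialized the idea before the meeting?",
        "Kaplan warns: 'Otherwise confident executives overestimate the risk of speaking up and underestimate the risk of staying silent.'",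
        "What's the second-order effect if you do nothing?"]
    else questions
  let questions := if (["delegate", "trust", "let go", "handoff", "empower"] : List String).any (fun w => PySem.Str.isIn w text) then
      questions ++ ["Are you delegating the result or the method? If the method, you haven't actually delegated.",
        "What's the worst that happens if " ++ name ++ " does it differently than you would?",
        "Johnson says: your primary goal is to work yourself out of a job. What are you still holding onto?"]
    else questions
  let questions := if (["hire", "interview", "candidate", "recruit"] : List String).any (fun w => PySem.Str.isIn w text) then
      questions ++ ["Buckingham: what specific talents does this role require? Not the job title — the actual talents.",
        "Grove: 'Careful interviewing doesn't guarantee anything, it merely increases your odds of getting lucky.'",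
        "Are you hiring for the role as it is today, or as it will be in 6 months?"]
    else questions
  let questions := if (["conflict", "disagree", "tension", "difficult"] : List String).any (fun w => PySem.Str.isIn w text) then
      questions ++ ["Have you named the conflict explicitly? 'Try to make the implicit, explicit.'",
        "Is this a difference of agendas, perceptions, or personal styles?",
        "What would it look like to approach this person as an ally, not an adversary?"]
    else questions
  let questions := if (["change", "reorg", "transition", "new"] : List String).any (fun w => PySem.Str.isIn w text) then
      questions ++ ["Frei: 'Comfortable inaction is riskier than uncomfortable action.' What's the cost of not now?",
        "Have your people shifted from 'difficult, costly, weird' to 'easy, rewarding, normal' yet?",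
        "What isn't changing? Clarifying that can be very reassuring."]
    else questions
  let questions := if questions = [] then
      questions ++ ["What are you really trying to accomplish here?",
        "What would you advise a friend in this exact situation?",
        "What's the thing you're not saying out loud?"]
    else questions
  PySem.List.slice questions none (some 4)

-- ===== PORT B =====
-- Port of Source B: module-level tables _GROUPS / _KW / _QS / _DEFAULTS, then the function.
def pvGroups : List (List String) := [
  ["frustrated", "angry", "annoyed", "upset"],
  ["performance", "underperform", "struggling", "behind"],
  ["promote", "promotion", "career", "growth", "develop"],
  ["feedback", "conversation", "tell them", "address"],
  ["meeting", "1-on-1", "one-on-one", "check-in"],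
  ["politics", "boss", "executive", "leadership", "influence"],
  ["delegate", "trust", "let go", "handoff", "empower"],
  ["hire", "interview", "candidate", "recruit"],
  ["conflict", "disagree", "tension", "difficult"],
  ["change", "reorg", "transition", "new"]]

-- _KW = [(w, c) for c, kws in enumerate(_GROUPS) for w in kws]
def pvKW : List (String × Int) :=
  (PySem.List.enumerate pvGroups).flatMap (fun g => g.2.map (fun w => (w, g.1)))

-- _QS[c](name); indexing by c — c outside 0..9 would be an IndexError in Python and
-- is unreachable (hit ⊆ 0..9); the [] default is never used.
def pvQ (c : Int) (name : String) : List String :=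
  if c = 0 then
    ["What is " ++ name ++ "'s perspective on this situation?",
     "Is this a pattern, or a one-time event? What evidence do you have?",
     "What would Grove say — is this a capability issue or a motivation issue?"]
  else if c = 1 then
    ["Have you set unambiguous expectations with " ++ name ++ "? Would they describe the same gap you see?",
     "Dellanna asks: are you delegating results or methods?",
     "What's the task-relevant maturity here — do they need structure, communication, or just monitoring?"]
  else if c = 2 then
    ["Is " ++ name ++ " scaling to the call, or comfortable at the current level?",
     "Buckingham says: are you trying to put in what was left out, or draw out what was left in?",
     "What would the next 6 months look like if they were truly stretched?"]
  else if c = 3 then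
    ["Have you practiced what you'll actually say? Can you frame it using SBI — Situation, Behavior, Impact?",
     "Grove: 'Don't confuse emotional comfort with operational need.' What outcome do you need from this conversation?",
     "What does " ++ name ++ " think they're doing well right now?"]
  else if c = 4 then
    ["What does " ++ name ++ " need from you right now — a manager or a leader?",
     "Are you doing 80% of the talking, or are they?",
     "What's the one thing you're avoiding bringing up?"]
  else if c = 5 then
    ["Who are your allies on this? Have you socialized the idea before the meeting?",
     "Kaplan warns: 'Otherwise confident executives overestimate the risk of speaking up and underestimate the risk of staying silent.'",
     "What's the second-order effect if you do nothing?"]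
  else if c = 6 then
    ["Are you delegating the result or the method? If the method, you haven't actually delegated.",
     "What's the worst that happens if " ++ name ++ " does it differently than you would?",
     "Johnson says: your primary goal is to work yourself out of a job. What are you still holding onto?"]
  else if c = 7 then
    ["Buckingham: what specific talents does this role require? Not the job title — the actual talents.",
     "Grove: 'Careful interviewing doesn't guarantee anything, it merely increases your odds of getting lucky.'",
     "Are you hiring for the role as it is today, or as it will be in 6 months?"]
  else if c = 8 then
    ["Have you named the conflict explicitly? 'Try to make the implicit, explicit.'",
     "Is this a difference of agendas, perceptions, or personal styles?",
     "What would it look like to approach this person as an ally, not an adversary?"]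
  else if c = 9 then
    ["Frei: 'Comfortable inaction is riskier than uncomfortable action.' What's the cost of not now?",
     "Have your people shifted from 'difficult, costly, weird' to 'easy, rewarding, normal' yet?",
     "What isn't changing? Clarifying that can be very reassuring."]
  else []

def pvDefaults : List String :=
  ["What are you really trying to accomplish here?",
   "What would you advise a friend in this exact situation?",
   "What's the thing you're not saying out loud?"]

def generate_template_questions_py_alt (notes : String) (context_type : String) (member_name : Option String) : List String :=
  let text := PySem.Str.lower notes
  let name := pvNameOf member_name
  -- hit = list(dict.fromkeys(c for w, c in _KW if w in text))
  let hit := PySem.List.dedup ((pvKW.filter (fun p => PySem.Str.isIn p.1 text)).map (fun p => p.2))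
  match hit with
  | [] => pvDefaults
  | [c1] => pvQ c1 name
  | c1 :: c2 :: _ => pvQ c1 name ++ [(pvQ c2 name).headD ""]  -- out.append(_QS[hit[1]](name)[0]); [0] of a nonempty literal block

-- ===== PRECONDITION & SPEC =====
def Spec_generate_template_questions_py (notes : String) (context_type : String) (member_name : Option String) (out : List String) : Prop := out = generate_template_questions_py_alt notes context_type member_name
instance (notes : String) (context_type : String) (member_name : Option String) (out : List String) : Decidable (Spec_generate_template_questions_py notes context_type member_name out) := by unfold Spec_generate_template_questions_py; infer_instance

-- ===== CLAIM (what is proved, stated in full; the proofs are below) =====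
def Claim_equal_generate_template_questions_py : Prop := ∀ (notes : String) (context_type : String) (member_name : Option String), Dom_generate_template_questions_py notes context_type member_name → Spec_generate_template_questions_py notes context_type member_name (generate_template_questions_py notes context_type member_name)

-- ===== LEMMAS AND PROOFS =====

-- A's per-branch append pattern, pulled out of the if.
theorem if_append (b : Bool) (qs x : List String) :
    (if b then qs ++ x else qs) = qs ++ (if b then x else []) := by
  cases b <;> simp

theorem filter_cons_append {α : Type} (p : α → Bool) (a : α) (l : List α) :
    List.filter p (a :: l) = (if p a then [a] else []) ++ List.filter p l := by
  by_cases h : p a <;> simp [List.filter_cons, h]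

theorem set_add_mem {s : List Int} {c : Int} (h : c ∈ s) :
    PySem.Set.add s c = s := by
  simp [PySem.Set.add, h]

theorem mem_set_add {s : List Int} {c x : Int} :
    x ∈ PySem.Set.add s c ↔ x ∈ s ∨ x = c := by
  by_cases hc : c ∈ s
  · rw [set_add_mem hc]
    exact ⟨Or.inl, fun h => h.elim id (fun e => e ▸ hc)⟩
  · simp [PySem.Set.add, hc]

theorem foldl_add_const (l : List Int) (c : Int) :
    ∀ (s : List Int), (∀ x ∈ l, x = c) →
      l.foldl PySem.Set.add s = if l = [] then s else PySem.Set.add s c := by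
  induction l with
  | nil => intro s _; simp
  | cons a t ih =>
    intro s h
    have ha : a = c := h a (by simp)
    subst ha
    simp only [List.foldl_cons, if_neg (List.cons_ne_nil a t)]
    rw [ih _ (fun x hx => h x (by simp [hx]))]
    by_cases ht : t = []
    · simp [ht]
    · rw [if_neg ht]
      rw [set_add_mem (mem_set_add.mpr (Or.inr rfl))]

theorem set_add_fresh {s : List Int} {c : Int} (h : c ∉ s) :
    PySem.Set.add s c = s ++ [c] := by
  simp [PySem.Set.add, List.contains_iff_mem, h]

theorem filter_flatMap {α β : Type} (l : List α) (g : α → List β) (p : β → Bool) :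
    (l.flatMap g).filter p = l.flatMap (fun a => (g a).filter p) := by
  induction l with
  | nil => simp
  | cons a t ih => simp [List.flatMap_cons, List.filter_append, ih]

theorem foldl_add_groups (f : String → Bool) :
    ∀ (gs : List (Int × List String)) (s : List Int),
      (gs.map Prod.fst).Nodup → (∀ x ∈ s, x ∉ gs.map Prod.fst) →
      ((gs.flatMap (fun g => (g.2.filter f).map (fun _ => g.1))).foldl PySem.Set.add s)
        = s ++ (gs.filter (fun g => g.2.any f)).map Prod.fst := by
  intro gs
  induction gs with
  | nil => intro s _ _; simp
  | cons g rest ih =>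
    intro s hnd hs
    simp only [List.flatMap_cons, List.foldl_append]
    have hconst : ∀ x ∈ (g.2.filter f).map (fun _ => g.1), x = g.1 := by
      intro x hx; simp at hx; exact hx.2
    rw [foldl_add_const _ _ s hconst]
    have hcn : g.1 ∉ s := by
      intro hc; exact hs g.1 hc (by simp)
    rw [List.map_cons] at hnd
    obtain ⟨hg1rest, hnd'⟩ := List.nodup_cons.mp hnd
    by_cases hb : g.2.any f
    · have hne : (g.2.filter f).map (fun _ => g.1) ≠ [] := by
        simp only [ne_eq, List.map_eq_nil_iff, List.filter_eq_nil_iff]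
        simp only [List.any_eq_true] at hb
        obtain ⟨w, hw, hfw⟩ := hb
        intro hall; exact absurd hfw (by simpa using hall w hw)
      rw [if_neg hne, set_add_fresh hcn]
      rw [ih (s ++ [g.1]) hnd' ?_]
      · simp [List.filter_cons, hb]
      · intro x hx
        rcases List.mem_append.mp hx with h1 | h1
        · exact fun hmem => hs x h1 (by simp [hmem])
        · simp at h1; subst h1; exact hg1rest
    · have hnil : (g.2.filter f).map (fun _ => g.1) = [] := by
        simp only [List.map_eq_nil_iff, List.filter_eq_nil_iff]
        intro w hw
        simp only [List.any_eq_true] at hb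
        intro hfw; exact hb ⟨w, hw, hfw⟩
      rw [if_pos hnil]
      rw [ih s hnd' (fun x hx hm => hs x hx (by simp [hm]))]
      simp [List.filter_cons, Bool.of_not_eq_true hb]

-- B's hit list characterized: the matched category indices, in ascending order.
theorem hit_eq (text : String) :
    PySem.List.dedup ((pvKW.filter (fun p => PySem.Str.isIn p.1 text)).map (fun p => p.2))
      = ((PySem.List.enumerate pvGroups).filter
          (fun g => g.2.any (fun w => PySem.Str.isIn w text))).map Prod.fst := by
  have h1 : (pvKW.filter (fun p => PySem.Str.isIn p.1 text)).map (fun p => p.2)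
      = (PySem.List.enumerate pvGroups).flatMap
          (fun g => (g.2.filter (fun w => PySem.Str.isIn w text)).map (fun _ => g.1)) := by
    unfold pvKW
    rw [filter_flatMap, List.map_flatMap]
    congr 1; funext g
    rw [List.filter_map]
    simp [Function.comp_def, List.map_const']
  rw [h1, PySem.List.dedup_eq_ofList, PySem.Set.ofList_eq_foldl]
  have := foldl_add_groups (fun w => PySem.Str.isIn w text) (PySem.List.enumerate pvGroups) []
    (by decide) (by simp)
  simpa using this

-- every matched category index lies in 0..9
theorem enum_fst_lt : ∀ p ∈ PySem.List.enumerate pvGroups, 0 ≤ p.1 ∧ p.1 < 10 := by decide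

-- A's chain of conditional appends, rewritten as build-all-then-truncate over the
-- matched category indices.
set_option maxRecDepth 20000 in
theorem A_eq (notes : String) (context_type : String) (member_name : Option String) :
    generate_template_questions_py notes context_type member_name =
      (let q := (((PySem.List.enumerate pvGroups).filter
           (fun g => g.2.any (fun w => PySem.Str.isIn w (PySem.Str.lower notes)))).map Prod.fst).flatMap
           (fun c => pvQ c (pvNameOf member_name))
       PySem.List.slice (if q = [] then q ++ pvDefaults else q) none (some 4)) := by
  unfold generate_template_questions_py
  simp only [if_append, List.nil_append]
  simp only [PySem.List.enumerate, pvGroups, pvDefaults, filter_cons_append, List.filter_nil,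
    List.map_append, List.flatMap_append,
    apply_ite (List.map (Prod.fst : Int × List String → Int)),
    apply_ite (List.flatMap (fun c => pvQ c (pvNameOf member_name))),
    List.map_cons, List.map_nil, List.flatMap_cons, List.flatMap_nil,
    List.append_nil, List.nil_append, List.append_assoc]
  simp only [pvQ, Int.reduceAdd, Int.reduceEq, reduceIte, List.append_nil, List.append_assoc]

-- ===== VERDICT (by name: the statement is the Claim_ definition above) =====
theorem generate_template_questions_py_spec : Claim_equal_generate_template_questions_py := by
  intro notes context_type member_name _
  unfold Spec_generate_template_questions_py
  rw [A_eq]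
  simp only [generate_template_questions_py_alt]
  rw [hit_eq]
  have hlen : ∀ c ∈ ((PySem.List.enumerate pvGroups).filter
      (fun g => g.2.any (fun w => PySem.Str.isIn w (PySem.Str.lower notes)))).map Prod.fst,
      (pvQ c (pvNameOf member_name)).length = 3 := by
    intro c hc
    simp only [List.mem_map, List.mem_filter] at hc
    obtain ⟨p, ⟨hp, _⟩, hpc⟩ := hc
    have hb := enum_fst_lt p hp
    rw [hpc] at hb
    obtain ⟨h0, h10⟩ := hb
    interval_cases c <;> simp [pvQ]
  generalize hg : ((PySem.List.enumerate pvGroups).filter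
      (fun g => g.2.any (fun w => PySem.Str.isIn w (PySem.Str.lower notes)))).map Prod.fst = cats at hlen ⊢
  rcases cats with _ | ⟨c1, _ | ⟨c2, rest⟩⟩
  · simp [pvDefaults, PySem.List.slice_to, List.take]
  · obtain ⟨a, b, c, h1⟩ := List.length_eq_three.mp (hlen c1 (by simp))
    simp [h1, PySem.List.slice_to, List.take]
  · obtain ⟨a, b, c, h1⟩ := List.length_eq_three.mp (hlen c1 (by simp))
    obtain ⟨d, e, f', h2⟩ := List.length_eq_three.mp (hlen c2 (by simp))
    simp [h1, h2, PySem.List.slice_to, List.take]
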